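-- pv_equiv track=rewrite | github.com/clarkmyfancy/TDD_projects | incrementDigits/incrementDigits.py | coalesceListToNumber
-- ===== SOURCE A (Python) =====
-- def incrementDigit(x):
-- 	return x+1
--
-- def coalesceListToNumber(inputList):
-- 	coalescedNumber = 0
-- 	inputList = inputList[::-1]
-- 	multiplier = 1
-- 	for x in inputList:
-- 		coalescedNumber += incrementDigit(x)*multiplier
-- 		if x == 9:
-- 			multiplier *= 100
-- 		else:
-- 			multiplier *= 10
--
-- 	return coalescedNumber
-- ===== SOURCE B (Python) =====
-- def coalesceListToNumber(inputList):
-- 	result = 0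
-- 	for x in inputList:
-- 		result = result * (100 if x == 9 else 10) + (x + 1)
-- 	return result
-- ===== Notes on version B (the rewrite author's own statement) =====
-- stated objective: simpler
-- what changed: Replaces the list reversal plus separate multiplier accumulator with a single forward Horner-style pass that multiplies the running result by the per-digit base (100 after a 9, else 10) and adds the incremented digit.
import Mathlib
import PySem

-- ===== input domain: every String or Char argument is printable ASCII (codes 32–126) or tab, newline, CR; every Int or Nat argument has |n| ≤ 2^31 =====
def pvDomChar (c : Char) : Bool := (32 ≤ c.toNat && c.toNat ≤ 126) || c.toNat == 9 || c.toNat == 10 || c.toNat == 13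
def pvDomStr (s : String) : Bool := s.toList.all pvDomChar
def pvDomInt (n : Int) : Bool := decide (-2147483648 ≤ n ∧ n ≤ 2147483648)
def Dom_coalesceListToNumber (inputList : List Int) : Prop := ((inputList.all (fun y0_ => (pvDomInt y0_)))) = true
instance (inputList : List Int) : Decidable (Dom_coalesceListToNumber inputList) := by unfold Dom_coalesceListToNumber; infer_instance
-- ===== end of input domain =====

-- B replaces A's reversal + multiplier accumulator with a single forward Horner-style pass (simpler decomposition, same cost).

-- ===== PORT A =====
def incrementDigit (x : Int) : Int := x + 1

def coalesceListToNumber (inputList : List Int) : Int :=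
  -- coalescedNumber = 0; inputList = inputList[::-1]; multiplier = 1
  let rev := (PySem.List.slice? inputList none none (-1)).getD []
  (rev.foldl (fun (s : Int × Int) x =>
      (s.1 + incrementDigit x * s.2, s.2 * (if x = 9 then 100 else 10)))
    (0, 1)).1

-- ===== PORT B =====
def coalesceListToNumber_alt (inputList : List Int) : Int :=
  inputList.foldl (fun r x => r * (if x = 9 then 100 else 10) + (x + 1)) 0

-- ===== PRECONDITION & SPEC =====
def Spec_coalesceListToNumber (inputList : List Int) (out : Int) : Prop := out = coalesceListToNumber_alt inputList
instance (inputList : List Int) (out : Int) : Decidable (Spec_coalesceListToNumber inputList out) := by unfold Spec_coalesceListToNumber; infer_instance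

-- ===== CLAIM (what is proved, stated in full; the proofs are below) =====
def Claim_equal_coalesceListToNumber : Prop := ∀ (inputList : List Int), Dom_coalesceListToNumber inputList → Spec_coalesceListToNumber inputList (coalesceListToNumber inputList)

-- ===== LEMMAS AND PROOFS =====

-- per-digit base
def pvBase (x : Int) : Int := if x = 9 then 100 else 10

-- value of the digits xs taken least-significant first
def pvLSF : List Int → Int
  | [] => 0
  | x :: xs => (x + 1) + pvBase x * pvLSF xs

lemma pvA_foldl (xs : List Int) (c m : Int) :
    (xs.foldl (fun (s : Int × Int) x =>
        (s.1 + incrementDigit x * s.2, s.2 * (if x = 9 then 100 else 10))) (c, m)).1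
      = c + m * pvLSF xs := by
  induction xs generalizing c m with
  | nil => simp [pvLSF]
  | cons x xs ih =>
    rw [List.foldl_cons, ih]
    simp only [pvLSF, incrementDigit, pvBase]
    ring

lemma pvLSF_append_singleton (ys : List Int) (x : Int) :
    pvLSF (ys ++ [x]) = pvLSF ys + (ys.map pvBase).prod * (x + 1) := by
  induction ys with
  | nil => simp [pvLSF]
  | cons y ys ih => simp [pvLSF, ih]; ring

lemma pvB_foldl (xs : List Int) (r : Int) :
    xs.foldl (fun r x => r * (if x = 9 then 100 else 10) + (x + 1)) r
      = r * (xs.map pvBase).prod + pvLSF xs.reverse := by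
  induction xs generalizing r with
  | nil => simp [pvLSF]
  | cons x xs ih =>
    simp only [List.foldl_cons, ih, List.reverse_cons, pvLSF_append_singleton,
      List.map_cons, List.prod_cons, List.map_reverse, List.prod_reverse, pvBase]
    ring

-- ===== VERDICT (by name: the statement is the Claim_ definition above) =====
theorem coalesceListToNumber_spec : Claim_equal_coalesceListToNumber := by
  intro xs _
  show coalesceListToNumber xs = coalesceListToNumber_alt xs
  unfold coalesceListToNumber coalesceListToNumber_alt
  rw [PySem.List.slice?_none_none_neg_one]
  simp only [Option.getD_some, pvA_foldl, pvB_foldl]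
  ring
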